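-- pv_equiv track=rewrite | github.com/oswinrozario/Assignment_Timecard | oswin_sol.py | has_worked_for_7_days
-- ===== SOURCE A (Python) =====
-- def has_worked_for_7_days(time_in_list):
--     max_consecutive_days = 1
--     for i in range(0,len(time_in_list)):
--         consecutive_days = 1
--         j = i
--         while(j+1 < len(time_in_list)):
--             day_difference = (time_in_list[j + 1] - time_in_list[j])
--             j+=1
--             if(day_difference == 1):
--                 consecutive_days += 1
--                 max_consecutive_days = max(max_consecutive_days,consecutive_days)
--                 if max_consecutive_days >= 7:
--                     return True
--             else:
--                 i = j
--                 break
--     if max_consecutive_days >= 7: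
--             return True
--     return False
-- ===== SOURCE B (Python) =====
-- def has_worked_for_7_days(time_in_list):
--     run = 1
--     for k in range(1, len(time_in_list)):
--         if time_in_list[k] - time_in_list[k - 1] == 1:
--             run += 1
--             if run >= 7:
--                 return True
--         else:
--             run = 1
--     return False
-- ===== Notes on version B (the rewrite author's own statement) =====
-- stated objective: faster
-- what changed: Replaced A's restart-from-every-index nested scan (outer for with an inner while re-counting each streak) by a single forward pass over adjacent pairs with one running streak counter.
import Mathlib
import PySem

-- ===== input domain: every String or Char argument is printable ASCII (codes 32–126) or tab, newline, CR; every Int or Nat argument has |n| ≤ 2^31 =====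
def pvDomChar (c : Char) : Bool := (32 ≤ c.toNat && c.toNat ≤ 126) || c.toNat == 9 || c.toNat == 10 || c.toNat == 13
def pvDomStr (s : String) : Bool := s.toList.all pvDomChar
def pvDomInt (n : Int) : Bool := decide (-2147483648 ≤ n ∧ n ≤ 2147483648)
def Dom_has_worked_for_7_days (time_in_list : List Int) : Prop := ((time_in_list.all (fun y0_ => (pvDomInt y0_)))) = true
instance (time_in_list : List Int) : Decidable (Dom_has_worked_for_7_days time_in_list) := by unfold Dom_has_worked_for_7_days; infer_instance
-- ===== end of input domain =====

-- B replaces A's restart-from-every-index nested scan by one forward pass with a running streak counter (simpler).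

-- ===== PORT A =====
-- inner while loop of A: state (j, consecutive_days, max_consecutive_days);
-- returns none for the early `return True`, some mx' when the while loop finishes.
-- Indices j and j+1 are guarded in range and nonnegative, so getD is exact for Python's xs[j].
def pvInnerA (xs : List Int) (j cd mx : Nat) : Option Nat :=
  if _h : j + 1 < xs.length then
    -- day_difference = xs[j+1] - xs[j]; j += 1
    if xs.getD (j + 1) 0 - xs.getD j 0 = 1 then
      if 7 ≤ max mx (cd + 1) then none
      else pvInnerA xs (j + 1) (cd + 1) (max mx (cd + 1))
    else some mx  -- `i = j; break` — the assignment to i is dead in Python (for-range rebinds i)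
  else some mx
termination_by xs.length - j

-- outer `for i in range(0, len(xs))`, threading max_consecutive_days
def pvOuterA (xs : List Int) (i mx : Nat) : Bool :=
  if _h : i < xs.length then
    match pvInnerA xs i 1 mx with
    | none => true
    | some mx' => pvOuterA xs (i + 1) mx'
  else decide (7 ≤ mx)  -- trailing `if max_consecutive_days >= 7: return True; return False`
termination_by xs.length - i

def has_worked_for_7_days (time_in_list : List Int) : Bool :=
  pvOuterA time_in_list 0 1

-- ===== PORT B =====
-- single pass: `for k in range(1, len(xs))` with running counter `run`
def pvLoopB (xs : List Int) (k run : Nat) : Bool :=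
  if _h : k < xs.length then
    if xs.getD k 0 - xs.getD (k - 1) 0 = 1 then
      if 7 ≤ run + 1 then true
      else pvLoopB xs (k + 1) (run + 1)
    else pvLoopB xs (k + 1) 1
  else false
termination_by xs.length - k

def has_worked_for_7_days_alt (time_in_list : List Int) : Bool :=
  pvLoopB time_in_list 1 1

-- ===== PRECONDITION & SPEC =====
def Spec_has_worked_for_7_days (time_in_list : List Int) (out : Bool) : Prop := out = has_worked_for_7_days_alt time_in_list
instance (time_in_list : List Int) (out : Bool) : Decidable (Spec_has_worked_for_7_days time_in_list out) := by unfold Spec_has_worked_for_7_days; infer_instance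

-- ===== CLAIM (what is proved, stated in full; the proofs are below) =====
def Claim_equal_has_worked_for_7_days : Prop := ∀ (time_in_list : List Int), Dom_has_worked_for_7_days time_in_list → Spec_has_worked_for_7_days time_in_list (has_worked_for_7_days time_in_list)

-- ===== LEMMAS AND PROOFS =====

-- length of the maximal run of `+1` differences starting at index j
def pvStreak (xs : List Int) (j : Nat) : Nat :=
  if _h : j + 1 < xs.length then
    if xs.getD (j + 1) 0 - xs.getD j 0 = 1 then pvStreak xs (j + 1) + 1 else 0
  else 0
termination_by xs.length - j

theorem pvStreak_zero (xs : List Int) (j : Nat) (h : xs.length ≤ j + 1) :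
    pvStreak xs j = 0 := by
  rw [pvStreak]; simp [Nat.not_lt.mpr h]

theorem pvInnerA_spec (xs : List Int) (j cd mx : Nat)
    (h1 : cd ≤ mx) (h2 : mx ≤ 6) :
    pvInnerA xs j cd mx =
      if 7 ≤ cd + pvStreak xs j then none else some (max mx (cd + pvStreak xs j)) := by
  rw [pvInnerA, pvStreak]
  split
  · split
    · rename_i hlt hd
      by_cases h7 : 7 ≤ max mx (cd + 1)
      · have : 7 ≤ cd + (pvStreak xs (j + 1) + 1) := by omega
        simp [h7, this]
      · have ih := pvInnerA_spec xs (j + 1) (cd + 1) (max mx (cd + 1))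
          (le_max_right _ _) (by omega)
        have hmx : max (max mx (cd + 1)) (cd + (pvStreak xs (j + 1) + 1))
            = max mx (cd + (pvStreak xs (j + 1) + 1)) := by omega
        rw [if_neg h7, ih,
          show cd + 1 + pvStreak xs (j + 1) = cd + (pvStreak xs (j + 1) + 1) from by omega,
          hmx]
    · rw [if_neg (by omega : ¬ 7 ≤ cd + 0), Nat.add_zero, Nat.max_eq_left h1]
  · rw [if_neg (by omega : ¬ 7 ≤ cd + 0), Nat.add_zero, Nat.max_eq_left h1]
termination_by xs.length - j
decreasing_by omega

theorem pvOuterA_spec (xs : List Int) (i mx : Nat) (h1 : 1 ≤ mx) (h2 : mx ≤ 6) :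
    pvOuterA xs i mx = true ↔ ∃ j, i ≤ j ∧ 6 ≤ pvStreak xs j := by
  rw [pvOuterA]
  split
  · rename_i hlt
    rw [pvInnerA_spec xs i 1 mx h1 h2]
    by_cases h7 : 7 ≤ 1 + pvStreak xs i
    · simp only [h7, if_pos]
      exact ⟨fun _ => ⟨i, le_refl _, by omega⟩, fun _ => trivial⟩
    · rw [if_neg h7]
      have ih := pvOuterA_spec xs (i + 1) (max mx (1 + pvStreak xs i))
        (by omega) (by omega)
      simp only [ih]
      constructor
      · rintro ⟨j, hj, hs⟩; exact ⟨j, by omega, hs⟩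
      · rintro ⟨j, hj, hs⟩
        refine ⟨j, ?_, hs⟩
        rcases Nat.eq_or_lt_of_le hj with rfl | h
        · omega
        · omega
  · rename_i hge
    constructor
    · intro h; exact absurd (of_decide_eq_true h) (by omega)
    · rintro ⟨j, hj, hs⟩
      rw [pvStreak_zero xs j (by omega)] at hs; omega
termination_by xs.length - i
decreasing_by omega

theorem pvLoopB_spec (xs : List Int) (k run : Nat) (h1 : 1 ≤ run) (h2 : run ≤ 6) :
    pvLoopB xs (k + 1) run = true ↔
      7 ≤ run + pvStreak xs k ∨ ∃ j, k + 1 ≤ j ∧ 6 ≤ pvStreak xs j := by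
  rw [pvLoopB]
  have hs : pvStreak xs k =
      if _h : k + 1 < xs.length then
        if xs.getD (k + 1) 0 - xs.getD k 0 = 1 then pvStreak xs (k + 1) + 1 else 0
      else 0 := by rw [pvStreak]
  split
  · rename_i hlt
    simp only [Nat.add_sub_cancel]
    split
    · rename_i hd
      rw [hs]; simp only [hlt, hd, dif_pos, if_pos]
      by_cases h7 : 7 ≤ run + 1
      · simp only [h7, if_pos]
        exact ⟨fun _ => Or.inl (by omega), fun _ => trivial⟩
      · rw [if_neg h7]
        have ih := pvLoopB_spec xs (k + 1) (run + 1) (by omega) (by omega)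
        rw [ih]
        constructor
        · rintro (h | ⟨j, hj, hsj⟩)
          · exact Or.inl (by omega)
          · exact Or.inr ⟨j, by omega, hsj⟩
        · rintro (h | ⟨j, hj, hsj⟩)
          · exact Or.inl (by omega)
          · rcases Nat.eq_or_lt_of_le hj with rfl | hlt'
            · exact Or.inl (by omega)
            · exact Or.inr ⟨j, by omega, hsj⟩
    · rename_i hd
      rw [hs]; simp only [hlt, hd, dif_pos, if_neg, if_false]
      have ih := pvLoopB_spec xs (k + 1) 1 (le_refl _) (by omega)
      rw [ih]
      constructor
      · rintro (h | ⟨j, hj, hsj⟩)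
        · exact Or.inr ⟨k + 1, le_refl _, by omega⟩
        · exact Or.inr ⟨j, by omega, hsj⟩
      · rintro (h | ⟨j, hj, hsj⟩)
        · omega
        · rcases Nat.eq_or_lt_of_le hj with rfl | hlt'
          · exact Or.inl (by omega)
          · exact Or.inr ⟨j, by omega, hsj⟩
  · rename_i hge
    rw [hs]
    have hk1 : ¬ k + 1 < xs.length := by omega
    simp only [hk1, dif_neg, not_false_iff]
    constructor
    · intro h; exact absurd h (by simp)
    · rintro (h | ⟨j, hj, hsj⟩)
      · omega
      · rw [pvStreak_zero xs j (by omega)] at hsj; omega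
termination_by xs.length - k
decreasing_by all_goals omega

theorem pv_bool_eq {a b : Bool} (h : a = true ↔ b = true) : a = b := by
  cases a <;> cases b <;> simp_all

-- ===== VERDICT (by name: the statement is the Claim_ definition above) =====
theorem has_worked_for_7_days_spec : Claim_equal_has_worked_for_7_days := by
  intro xs _
  unfold Spec_has_worked_for_7_days has_worked_for_7_days has_worked_for_7_days_alt
  apply pv_bool_eq
  rw [pvOuterA_spec xs 0 1 (le_refl _) (by omega),
      show (1 : Nat) = 0 + 1 from rfl, pvLoopB_spec xs 0 1 (le_refl _) (by omega)]
  constructor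
  · rintro ⟨j, _, hs⟩
    rcases j with _ | j
    · exact Or.inl (by omega)
    · exact Or.inr ⟨j + 1, by omega, hs⟩
  · rintro (h | ⟨j, hj, hs⟩)
    · exact ⟨0, by omega, by omega⟩
    · exact ⟨j, by omega, hs⟩
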